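-- pv_equiv track=rewrite | github.com/nfernan1/speedreader | Google Drive/Documents/Class/2013/ICS 33/Solutions copy/inlabexam1students/Lab 1/YoungEmily/exam.py | find_influencers
-- ===== SOURCE A (Python) =====
-- from math        import ceil
--
-- def find_influencers(graph) -> set:
--     infl = dict()
--     for person in graph: infl[person] = len(graph[person])-ceil(len(graph[person])/2)
--     cand=[(infl[c], len(graph[c]), c) for c in infl]
--     while len(cand)>0:
--         min_c = min(cand)
--         cand.remove(min_c)
--         del infl[min_c[2]]
--         for person2 in graph:
--             if (min_c[2] in graph[person2]) and (person2 in infl):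
--                 infl[person2] -= 1
--         cand=[(infl[c], len(graph[c]), c) for c in infl if infl[c] >= 0]
--     return set(infl.keys())
-- ===== SOURCE B (Python) =====
-- def find_influencers(graph) -> set:
--     # Different strategy: precompute degrees and a reverse index once, so each
--     # round does one keyed min-scan plus O(in-degree) decrements instead of
--     # rescanning every adjacency list and rebuilding a candidate list.
--     deg = {}
--     infl = {}
--     rev = {}
--     for p in graph:
--         deg[p] = len(graph[p])
--         infl[p] = len(graph[p]) // 2
--         for x in dict.fromkeys(graph[p]):
--             rev.setdefault(x, []).append(p)
--     while True:
--         best = None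
--         m = None
--         for p, v in infl.items():
--             if v >= 0 and (best is None or (v, deg[p], p) < best):
--                 best = (v, deg[p], p)
--                 m = p
--         if m is None:
--             break
--         del infl[m]
--         for q in rev.get(m, ()):
--             if q in infl:
--                 infl[q] -= 1
--     return set(infl)
-- ===== Notes on version B (the rewrite author's own statement) =====
-- stated objective: faster
-- what changed: Instead of rescanning every adjacency list and rebuilding the candidate tuple list each round, B precomputes a degree table and a reverse-adjacency index once, then each round does a single keyed min-scan over the live dict and decrements only the in-neighbours of the removed person.
import Mathlib
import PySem

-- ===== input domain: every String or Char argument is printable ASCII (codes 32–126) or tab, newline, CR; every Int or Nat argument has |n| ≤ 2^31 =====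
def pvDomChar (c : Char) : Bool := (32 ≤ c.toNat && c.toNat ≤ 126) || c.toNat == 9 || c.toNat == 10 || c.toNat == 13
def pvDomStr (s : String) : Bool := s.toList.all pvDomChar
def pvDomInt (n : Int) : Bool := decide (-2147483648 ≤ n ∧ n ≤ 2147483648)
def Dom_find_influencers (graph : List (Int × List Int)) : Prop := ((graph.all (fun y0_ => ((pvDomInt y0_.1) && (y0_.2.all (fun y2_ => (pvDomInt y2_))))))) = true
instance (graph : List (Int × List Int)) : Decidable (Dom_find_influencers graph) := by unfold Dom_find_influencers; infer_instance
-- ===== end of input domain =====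

-- B replaces A's per-round rescan of every adjacency list (and candidate-list rebuild) by a
-- degree table and reverse index built once, with a single keyed min-scan per round (alternative
-- algorithm; fewer membership scans on dense graphs).

-- ===== PORT A =====
-- Python's `<` on int-triples (lexicographic), ported by hand; exact for int tuples.
def pvLt3 (a b : Int × Int × Int) : Bool :=
  a.1 < b.1 || (a.1 == b.1 && (a.2.1 < b.2.1 || (a.2.1 == b.2.1 && a.2.2 < b.2.2)))

-- `min(cand)` on a non-empty list of int-triples: first extremal element, by hand (exact).
def pvMin3 (x : Int × Int × Int) (xs : List (Int × Int × Int)) : Int × Int × Int :=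
  xs.foldl (fun m t => if pvLt3 t m then t else m) x

-- A's candidate rebuild `[(infl[c], len(graph[c]), c) for c in infl if infl[c] >= 0]`
def pvCand (g : PySem.Dict Int (List Int)) (infl : PySem.Dict Int Int) : List (Int × Int × Int) :=
  infl.keys.filterMap (fun c =>
    if 0 ≤ infl.getD c 0 then some (infl.getD c 0, ((g.getD c []).length : Int), c) else none)

-- key/size facts cited by the ports' termination proofs
theorem pv_size_erase_lt {ν : Type} (d : PySem.Dict Int ν) (k : Int)
    (h : d.contains k = true) : (d.erase k).size < d.size := by
  simp only [PySem.Dict.size, PySem.Dict.erase, PySem.Dict.contains, List.any_eq_true] at *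
  obtain ⟨p, hp, hpk⟩ := h
  exact List.length_filter_lt_length_iff_exists.2 ⟨p, hp, by simp [hpk]⟩

theorem pv_keys_decfold (l : List Int) (f : Int → Int) (d : PySem.Dict Int Int) :
    (l.foldl (fun d q => if d.contains q then d.modify q 0 f else d) d).keys = d.keys := by
  induction l generalizing d with
  | nil => rfl
  | cons q t ih =>
    simp only [List.foldl_cons]
    rw [ih]
    split
    · next hq => rw [PySem.Dict.keys_modify, PySem.Dict.keys_insert_of_contains d _ hq]
    · rfl

theorem pv_keys_guardfold (l : List Int) (c : Int → Bool) (f : Int → Int)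
    (d : PySem.Dict Int Int) :
    (l.foldl (fun d q => if c q && d.contains q then d.modify q 0 f else d) d).keys = d.keys := by
  induction l generalizing d with
  | nil => rfl
  | cons q t ih =>
    simp only [List.foldl_cons]
    rw [ih]
    by_cases hc : c q
    · by_cases hq : d.contains q
      · simp only [hc, hq, Bool.and_self, if_true]
        rw [PySem.Dict.keys_modify, PySem.Dict.keys_insert_of_contains d _ hq]
      · simp [hq]
    · simp [hc]

theorem pv_size_decfold (l : List Int) (f : Int → Int) (d : PySem.Dict Int Int) :
    (l.foldl (fun d q => if d.contains q then d.modify q 0 f else d) d).size = d.size := by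
  have h := pv_keys_decfold l f d
  simpa [PySem.Dict.keys, PySem.Dict.size] using congrArg List.length h

theorem pv_size_guardfold (l : List Int) (c : Int → Bool) (f : Int → Int)
    (d : PySem.Dict Int Int) :
    (l.foldl (fun d q => if c q && d.contains q then d.modify q 0 f else d) d).size = d.size := by
  have h := pv_keys_guardfold l c f d
  simpa [PySem.Dict.keys, PySem.Dict.size] using congrArg List.length h

def pvALoop (g : PySem.Dict Int (List Int)) (infl : PySem.Dict Int Int)
    (cand : List (Int × Int × Int)) : List Int :=
  match cand with
  | [] => infl.keys
  | c0 :: rest =>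
    let mc := pvMin3 c0 rest
    -- `cand.remove(min_c)` in A cannot raise (min_c ∈ cand) and its result is dead:
    -- cand is reassigned below before it is read again.
    let m := mc.2.2
    if hm : infl.contains m then
      -- `del infl[min_c[2]]` (m is a key of infl whenever this runs in Python;
      -- the else branch is only a totality guard)
      let infl1 := infl.erase m
      let infl2 := g.keys.foldl (fun d p2 =>
        if (g.getD p2 []).contains m && d.contains p2 then d.modify p2 0 (· - 1) else d) infl1
      pvALoop g infl2 (pvCand g infl2)
    else infl.keys
  termination_by infl.size
  decreasing_by
    exact (pv_size_guardfold _ _ _ _).trans_lt (pv_size_erase_lt infl _ hm)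

def find_influencers (graph : List (Int × List Int)) : List Int :=
  let g := PySem.Dict.ofList graph
  -- math.ceil(len/2) ported as (len+1)//2: exact for list lengths
  let infl := g.keys.foldl (fun d person =>
    d.insert person (((g.getD person []).length : Int)
      - PySem.Int.floordiv (((g.getD person []).length : Int) + 1) 2)) PySem.Dict.empty
  let cand := infl.keys.map (fun c => (infl.getD c 0, ((g.getD c []).length : Int), c))
  pvALoop g infl cand

-- ===== PORT B =====
-- B's min-scan `for p, v in infl.items(): if v >= 0 and (best is None or (v, deg[p], p) < best)`
def pvScanMin (deg : PySem.Dict Int Int) (infl : PySem.Dict Int Int) : Option Int :=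
  (infl.items.foldl (fun acc kv =>
    if decide (0 ≤ kv.2) && (match acc with
      | none => true
      | some b => pvLt3 (kv.2, deg.getD kv.1 0, kv.1) b)
    then some (kv.2, deg.getD kv.1 0, kv.1) else acc) none).map (·.2.2)

def pvBLoop (deg : PySem.Dict Int Int) (rev : PySem.Dict Int (List Int))
    (infl : PySem.Dict Int Int) : List Int :=
  match pvScanMin deg infl with
  | none => infl.keys
  | some m =>
    if hm : infl.contains m then
      -- `del infl[m]` (m always a key of infl in Python; else branch is a totality guard)
      let infl1 := infl.erase m
      let infl2 := (rev.getD m []).foldl (fun d q =>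
        if d.contains q then d.modify q 0 (· - 1) else d) infl1
      pvBLoop deg rev infl2
    else infl.keys
  termination_by infl.size
  decreasing_by
    exact (pv_size_decfold _ _ _).trans_lt (pv_size_erase_lt infl _ hm)

def find_influencers_alt (graph : List (Int × List Int)) : List Int :=
  let g := PySem.Dict.ofList graph
  -- single pass over graph building deg, infl and the reverse index
  -- (`rev.setdefault(x, []).append(p)` is exactly Dict.modify x [] (· ++ [p]))
  let s := g.keys.foldl
    (fun (s : PySem.Dict Int Int × PySem.Dict Int Int × PySem.Dict Int (List Int)) p =>
      (s.1.insert p ((g.getD p []).length : Int),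
       s.2.1.insert p (PySem.Int.floordiv ((g.getD p []).length : Int) 2),
       (PySem.List.dedup (g.getD p [])).foldl (fun r x => r.modify x [] (· ++ [p])) s.2.2))
    (PySem.Dict.empty, PySem.Dict.empty, PySem.Dict.empty)
  pvBLoop s.1 s.2.2 s.2.1

-- ===== PRECONDITION & SPEC =====
def Spec_find_influencers (graph : List (Int × List Int)) (out : List Int) : Prop := out = find_influencers_alt graph
instance (graph : List (Int × List Int)) (out : List Int) : Decidable (Spec_find_influencers graph out) := by unfold Spec_find_influencers; infer_instance

-- ===== CLAIM (what is proved, stated in full; the proofs are below) =====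
def Claim_equal_find_influencers : Prop := ∀ (graph : List (Int × List Int)), Dom_find_influencers graph → Spec_find_influencers graph (find_influencers graph)

-- ===== LEMMAS AND PROOFS =====

theorem pv_filterMap_if_true {α β : Type} (l : List α) (c : α → Prop) [DecidablePred c]
    (f : α → β) (h : ∀ x ∈ l, c x) :
    (l.filterMap (fun x => if c x then some (f x) else none)) = l.map f := by
  induction l with
  | nil => rfl
  | cons x t ih =>
    rw [List.filterMap_cons, if_pos (h x (by simp)), List.map_cons,
      ih (fun y hy => h y (by simp [hy]))]

theorem pv_foldl_guard_filter {σ : Type} (l : List Int) (c : Int → Bool)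
    (p : σ → Int → Bool) (step : σ → Int → σ) (d : σ) :
    l.foldl (fun d q => if c q && p d q then step d q else d) d
      = (l.filter c).foldl (fun d q => if p d q then step d q else d) d := by
  induction l generalizing d with
  | nil => rfl
  | cons q t ih =>
    by_cases hc : c q = true
    · simp only [List.foldl_cons, List.filter_cons, hc, Bool.true_and, if_true]
      exact ih _
    · have hc' : c q = false := by simpa using hc
      simp only [List.foldl_cons, List.filter_cons, hc', Bool.false_and,
        Bool.false_eq_true, if_false]
      exact ih d

-- the option-valued running minimum hidden in B's scan
def pvOptStep (acc : Option (Int × Int × Int)) (t : Int × Int × Int) :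
    Option (Int × Int × Int) :=
  match acc with
  | none => some t
  | some b => if pvLt3 t b then some t else some b

theorem pv_optfold_some (l : List (Int × Int × Int)) (a : Int × Int × Int) :
    l.foldl pvOptStep (some a) = some (pvMin3 a l) := by
  induction l generalizing a with
  | nil => rfl
  | cons t rest ih =>
    simp only [List.foldl_cons, pvMin3, pvOptStep]
    split
    · exact ih t
    · exact ih a

theorem pv_fuse {α : Type} (l : List α) (F : α → Option (Int × Int × Int))
    (acc : Option (Int × Int × Int)) :
    l.foldl (fun acc x => match F x with | some t => pvOptStep acc t | none => acc) acc
      = (l.filterMap F).foldl pvOptStep acc := by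
  induction l generalizing acc with
  | nil => rfl
  | cons x t ih =>
    simp only [List.foldl_cons, List.filterMap_cons]
    cases hF : F x with
    | none => simp [ih]
    | some v => simp [ih]

-- B's scan over infl.items computes the minimum of A's candidate list
theorem pv_scan_eq (g : PySem.Dict Int (List Int)) (deg infl : PySem.Dict Int Int)
    (hnd : infl.keys.Nodup)
    (hdeg : ∀ x : Int, deg.getD x 0 = ((g.getD x []).length : Int)) :
    pvScanMin deg infl = ((pvCand g infl).foldl pvOptStep none).map (·.2.2) := by
  unfold pvScanMin
  rw [PySem.Dict.items_eq_map_keys infl hnd 0, List.foldl_map]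
  have hstep : (fun (acc : Option (Int × Int × Int)) (c : Int) =>
      if decide (0 ≤ infl.getD c 0) && (match acc with
        | none => true
        | some b => pvLt3 (infl.getD c 0, deg.getD c 0, c) b)
      then some (infl.getD c 0, deg.getD c 0, c) else acc)
      = (fun acc c =>
        match (if 0 ≤ infl.getD c 0 then
            some (infl.getD c 0, ((g.getD c []).length : Int), c) else none) with
        | some t => pvOptStep acc t
        | none => acc) := by
    funext acc c
    rw [hdeg c]
    by_cases hv : 0 ≤ infl.getD c 0
    · cases acc with
      | none => simp [hv, pvOptStep]
      | some b =>
        simp only [hv, decide_true, Bool.true_and, pvOptStep]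
        split <;> simp_all
    · cases acc <;> simp [hv]
  rw [hstep, pv_fuse]
  rfl

-- the reverse index built by B lists exactly the people whose friend list contains x
theorem pv_rev_inner (S : List Int) (p x : Int) (r : PySem.Dict Int (List Int))
    (hS : S.Nodup) :
    (S.foldl (fun r y => r.modify y [] (· ++ [p])) r).getD x []
      = r.getD x [] ++ (if x ∈ S then [p] else []) := by
  induction S generalizing r with
  | nil => simp
  | cons y t ih =>
    simp only [List.foldl_cons]
    rw [ih _ (List.Nodup.of_cons hS)]
    rw [PySem.Dict.getD_modify]
    by_cases hxy : x = y
    · subst hxy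
      have hxt : x ∉ t := (List.nodup_cons.1 hS).1
      simp [hxt]
    · by_cases hxt : x ∈ t <;> simp [hxy, hxt]

theorem pv_rev_char (g : PySem.Dict Int (List Int)) (ks : List Int)
    (r : PySem.Dict Int (List Int)) (x : Int) :
    (ks.foldl (fun r p =>
        (PySem.List.dedup (g.getD p [])).foldl (fun r y => r.modify y [] (· ++ [p])) r)
      r).getD x []
      = r.getD x [] ++ ks.filter (fun p => (g.getD p []).contains x) := by
  induction ks generalizing r with
  | nil => simp
  | cons p t ih =>
    simp only [List.foldl_cons, List.filter_cons]
    rw [ih, pv_rev_inner _ _ _ _ (PySem.List.nodup_dedup _)]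
    by_cases hx : x ∈ g.getD p [] <;> simp [hx]

theorem pv_nodup_keys_erase {ν : Type} (d : PySem.Dict Int ν) (k : Int)
    (h : d.keys.Nodup) : (d.erase k).keys.Nodup := by
  simp only [PySem.Dict.keys, PySem.Dict.erase] at *
  exact h.sublist (List.Sublist.map _ List.filter_sublist)

theorem pv_nodup_decfold (l : List Int) (f : Int → Int) (d : PySem.Dict Int Int)
    (h : d.keys.Nodup) :
    (l.foldl (fun d q => if d.contains q then d.modify q 0 f else d) d).keys.Nodup := by
  rw [pv_keys_decfold]
  exact h

-- one-step unfoldings of the two loops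
theorem pvALoop_nil (g : PySem.Dict Int (List Int)) (infl : PySem.Dict Int Int) :
    pvALoop g infl [] = infl.keys := by
  rw [pvALoop]

theorem pvALoop_cons (g : PySem.Dict Int (List Int)) (infl : PySem.Dict Int Int)
    (c0 : Int × Int × Int) (rest : List (Int × Int × Int)) :
    pvALoop g infl (c0 :: rest)
      = if _hm : infl.contains (pvMin3 c0 rest).2.2 then
          pvALoop g (g.keys.foldl (fun d p2 =>
              if (g.getD p2 []).contains (pvMin3 c0 rest).2.2 && d.contains p2
              then d.modify p2 0 (· - 1) else d) (infl.erase (pvMin3 c0 rest).2.2))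
            (pvCand g (g.keys.foldl (fun d p2 =>
              if (g.getD p2 []).contains (pvMin3 c0 rest).2.2 && d.contains p2
              then d.modify p2 0 (· - 1) else d) (infl.erase (pvMin3 c0 rest).2.2)))
        else infl.keys := by
  rw [pvALoop]

theorem pvBLoop_none (deg : PySem.Dict Int Int) (rev : PySem.Dict Int (List Int))
    (infl : PySem.Dict Int Int) (h : pvScanMin deg infl = none) :
    pvBLoop deg rev infl = infl.keys := by
  rw [pvBLoop, h]

theorem pvBLoop_some (deg : PySem.Dict Int Int) (rev : PySem.Dict Int (List Int))
    (infl : PySem.Dict Int Int) (m : Int) (h : pvScanMin deg infl = some m) :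
    pvBLoop deg rev infl
      = if _hm : infl.contains m then
          pvBLoop deg rev ((rev.getD m []).foldl (fun d q =>
            if d.contains q then d.modify q 0 (· - 1) else d) (infl.erase m))
        else infl.keys := by
  rw [pvBLoop, h]

-- the two loops agree on every shared state
theorem pv_loop_eq (g : PySem.Dict Int (List Int)) (deg : PySem.Dict Int Int)
    (rev : PySem.Dict Int (List Int))
    (hdeg : ∀ x : Int, deg.getD x 0 = ((g.getD x []).length : Int))
    (hrev : ∀ x : Int, rev.getD x [] = g.keys.filter (fun p => (g.getD p []).contains x)) :
    ∀ (n : Nat) (infl : PySem.Dict Int Int), infl.size ≤ n → infl.keys.Nodup →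
      pvALoop g infl (pvCand g infl) = pvBLoop deg rev infl := by
  intro n
  induction n with
  | zero =>
    intro infl hs hnd
    have hempty : infl.items = [] := by
      cases h : infl.items with
      | nil => rfl
      | cons a t => exfalso; simp [PySem.Dict.size, h] at hs
    have hkeys : infl.keys = [] := by simp [PySem.Dict.keys, hempty]
    have hcand : pvCand g infl = [] := by simp [pvCand, hkeys]
    have hscan := pv_scan_eq g deg infl hnd hdeg
    rw [hcand] at hscan
    simp only [List.foldl_nil, Option.map_none] at hscan
    rw [hcand, pvALoop_nil, pvBLoop_none deg rev infl hscan]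
  | succ n ih =>
    intro infl hs hnd
    have hscan := pv_scan_eq g deg infl hnd hdeg
    cases hc : pvCand g infl with
    | nil =>
      rw [hc] at hscan
      simp only [List.foldl_nil, Option.map_none] at hscan
      rw [pvALoop_nil, pvBLoop_none deg rev infl hscan]
    | cons c0 rest =>
      rw [hc] at hscan
      have hmin : (c0 :: rest).foldl pvOptStep none = some (pvMin3 c0 rest) := by
        rw [List.foldl_cons]
        exact pv_optfold_some rest c0
      rw [hmin] at hscan
      simp only [Option.map_some] at hscan
      rw [pvALoop_cons, pvBLoop_some deg rev infl _ hscan]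
      by_cases hm : infl.contains (pvMin3 c0 rest).2.2 = true
      · rw [dif_pos hm, dif_pos hm]
        have hdec : g.keys.foldl (fun d p2 =>
            if (g.getD p2 []).contains (pvMin3 c0 rest).2.2 && d.contains p2
            then d.modify p2 0 (· - 1) else d) (infl.erase (pvMin3 c0 rest).2.2)
            = (rev.getD (pvMin3 c0 rest).2.2 []).foldl (fun d q =>
            if d.contains q then d.modify q 0 (· - 1) else d)
            (infl.erase (pvMin3 c0 rest).2.2) := by
          rw [pv_foldl_guard_filter, hrev]
        rw [hdec]
        apply ih
        · exact Nat.lt_succ_iff.1 (Nat.lt_of_lt_of_le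
            ((pv_size_decfold _ _ _).trans_lt (pv_size_erase_lt infl _ hm)) hs)
        · exact pv_nodup_decfold _ _ _ (pv_nodup_keys_erase infl _ hnd)
      · rw [dif_neg hm, dif_neg hm]

-- ceil arithmetic: len - ceil(len/2) = len // 2
theorem pv_halves (n : Nat) :
    (n : Int) - PySem.Int.floordiv ((n : Int) + 1) 2 = PySem.Int.floordiv (n : Int) 2 := by
  rw [PySem.Int.floordiv_eq_ediv_of_pos (by norm_num),
    PySem.Int.floordiv_eq_ediv_of_pos (by norm_num)]
  omega

-- named views of the two ports' initial states (each equal to its port's term by rfl)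
def pvVal (g : PySem.Dict Int (List Int)) (p : Int) : Int :=
  ((g.getD p []).length : Int) - PySem.Int.floordiv (((g.getD p []).length : Int) + 1) 2

def pvInflA (g : PySem.Dict Int (List Int)) : PySem.Dict Int Int :=
  g.keys.foldl (fun d person => d.insert person (pvVal g person)) PySem.Dict.empty

def pvCand0 (g : PySem.Dict Int (List Int)) : List (Int × Int × Int) :=
  (pvInflA g).keys.map (fun c => ((pvInflA g).getD c 0, ((g.getD c []).length : Int), c))

def pvDegB (g : PySem.Dict Int (List Int)) : PySem.Dict Int Int :=
  g.keys.foldl (fun d p => d.insert p ((g.getD p []).length : Int)) PySem.Dict.empty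

def pvInflB (g : PySem.Dict Int (List Int)) : PySem.Dict Int Int :=
  g.keys.foldl (fun d p => d.insert p (PySem.Int.floordiv ((g.getD p []).length : Int) 2))
    PySem.Dict.empty

def pvRevB (g : PySem.Dict Int (List Int)) : PySem.Dict Int (List Int) :=
  g.keys.foldl (fun r p =>
    (PySem.List.dedup (g.getD p [])).foldl (fun r x => r.modify x [] (· ++ [p])) r)
    PySem.Dict.empty

theorem pv_A_unfold (graph : List (Int × List Int)) :
    find_influencers graph = pvALoop (PySem.Dict.ofList graph)
      (pvInflA (PySem.Dict.ofList graph)) (pvCand0 (PySem.Dict.ofList graph)) := rfl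

theorem pv_build_split (g : PySem.Dict Int (List Int)) (ks : List Int)
    (d1 d2 : PySem.Dict Int Int) (d3 : PySem.Dict Int (List Int)) :
    ks.foldl (fun (s : PySem.Dict Int Int × PySem.Dict Int Int × PySem.Dict Int (List Int)) p =>
      (s.1.insert p ((g.getD p []).length : Int),
       s.2.1.insert p (PySem.Int.floordiv ((g.getD p []).length : Int) 2),
       (PySem.List.dedup (g.getD p [])).foldl (fun r x => r.modify x [] (· ++ [p])) s.2.2))
      (d1, d2, d3)
    = (ks.foldl (fun d p => d.insert p ((g.getD p []).length : Int)) d1,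
       ks.foldl (fun d p => d.insert p (PySem.Int.floordiv ((g.getD p []).length : Int) 2)) d2,
       ks.foldl (fun r p =>
         (PySem.List.dedup (g.getD p [])).foldl (fun r x => r.modify x [] (· ++ [p])) r) d3) := by
  induction ks generalizing d1 d2 d3 with
  | nil => rfl
  | cons p t ih => simpa using ih _ _ _

theorem pv_B_unfold (graph : List (Int × List Int)) :
    find_influencers_alt graph = pvBLoop (pvDegB (PySem.Dict.ofList graph))
      (pvRevB (PySem.Dict.ofList graph)) (pvInflB (PySem.Dict.ofList graph)) := by
  simp only [find_influencers_alt]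
  rw [pv_build_split]
  rfl

theorem pv_inflA_items (g : PySem.Dict Int (List Int)) (h : g.keys.Nodup) :
    (pvInflA g).items = g.keys.map (fun p => (p, pvVal g p)) := by
  have := PySem.Dict.items_foldl_insert_fresh g.keys (fun a => a) (pvVal g)
    PySem.Dict.empty (fun a _ => PySem.Dict.contains_empty a) (by simpa using h)
  simpa [pvInflA] using this

theorem pv_inflB_items (g : PySem.Dict Int (List Int)) (h : g.keys.Nodup) :
    (pvInflB g).items
      = g.keys.map (fun p => (p, PySem.Int.floordiv ((g.getD p []).length : Int) 2)) := by
  have := PySem.Dict.items_foldl_insert_fresh g.keys (fun a => a)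
    (fun p => PySem.Int.floordiv ((g.getD p []).length : Int) 2)
    PySem.Dict.empty (fun a _ => PySem.Dict.contains_empty a) (by simpa using h)
  simpa [pvInflB] using this

theorem pv_deg_items (g : PySem.Dict Int (List Int)) (h : g.keys.Nodup) :
    (pvDegB g).items = g.keys.map (fun p => (p, ((g.getD p []).length : Int))) := by
  have := PySem.Dict.items_foldl_insert_fresh g.keys (fun a => a)
    (fun p => ((g.getD p []).length : Int))
    PySem.Dict.empty (fun a _ => PySem.Dict.contains_empty a) (by simpa using h)
  simpa [pvDegB] using this

theorem pv_keys_inflA (g : PySem.Dict Int (List Int)) (h : g.keys.Nodup) :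
    (pvInflA g).keys = g.keys := by
  simp [PySem.Dict.keys, pv_inflA_items g h]

theorem pv_AB (g : PySem.Dict Int (List Int)) (h : g.keys.Nodup) :
    pvInflA g = pvInflB g := by
  apply PySem.Dict.ext
  rw [pv_inflA_items g h, pv_inflB_items g h]
  exact List.map_congr_left (fun p _ => by rw [pvVal, pv_halves])

theorem pv_deg_spec (g : PySem.Dict Int (List Int)) (h : g.keys.Nodup) (x : Int) :
    (pvDegB g).getD x 0 = ((g.getD x []).length : Int) := by
  have hkeys : (pvDegB g).keys = g.keys := by simp [PySem.Dict.keys, pv_deg_items g h]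
  by_cases hx : x ∈ g.keys
  · exact PySem.Dict.getD_of_mem_items (pvDegB g)
      (by rw [pv_deg_items g h]; exact List.mem_map_of_mem hx) (hkeys ▸ h) 0
  · have h1 : (pvDegB g).get? x = none :=
      (PySem.Dict.get?_eq_none_iff_not_mem_keys _ _).2 (hkeys ▸ hx)
    have h2 : g.get? x = none := (PySem.Dict.get?_eq_none_iff_not_mem_keys _ _).2 hx
    simp [PySem.Dict.getD, h1, h2]

theorem pv_rev_spec (g : PySem.Dict Int (List Int)) (x : Int) :
    (pvRevB g).getD x [] = g.keys.filter (fun p => (g.getD p []).contains x) := by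
  have := pv_rev_char g g.keys PySem.Dict.empty x
  simpa [pvRevB, PySem.Dict.getD_empty] using this

theorem pv_cand0 (g : PySem.Dict Int (List Int)) (h : g.keys.Nodup) :
    pvCand0 g = pvCand g (pvInflA g) := by
  have hval : ∀ c ∈ (pvInflA g).keys, (pvInflA g).getD c 0 = pvVal g c := by
    intro c hc
    rw [pv_keys_inflA g h] at hc
    exact PySem.Dict.getD_of_mem_items (pvInflA g)
      (by rw [pv_inflA_items g h]; exact List.mem_map_of_mem hc)
      (pv_keys_inflA g h ▸ h) 0
  have hpos : ∀ c ∈ (pvInflA g).keys, 0 ≤ (pvInflA g).getD c 0 := by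
    intro c hc
    rw [hval c hc, pvVal, pv_halves,
      PySem.Int.floordiv_eq_ediv_of_pos (by norm_num : (0:Int) < 2)]
    exact Int.ediv_nonneg (Int.natCast_nonneg _) (by norm_num)
  rw [pvCand0, pvCand, pv_filterMap_if_true _ _ _ hpos]

theorem pv_main (graph : List (Int × List Int)) :
    find_influencers graph = find_influencers_alt graph := by
  rw [pv_A_unfold, pv_B_unfold]
  have hnd : (PySem.Dict.ofList graph).keys.Nodup := PySem.Dict.nodup_keys_ofList graph
  rw [pv_cand0 _ hnd]
  exact (pv_loop_eq _ _ _ (pv_deg_spec _ hnd) (pv_rev_spec _)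
      (pvInflA (PySem.Dict.ofList graph)).size _ le_rfl
      (pv_keys_inflA _ hnd ▸ hnd)).trans
    (by rw [pv_AB _ hnd])

-- ===== VERDICT (by name: the statement is the Claim_ definition above) =====
theorem find_influencers_spec : Claim_equal_find_influencers := by
  intro graph _
  unfold Spec_find_influencers
  exact pv_main graph
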